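-- pv_equiv track=rewrite | github.com/HinaTezuka/proj_LA | activated_neuron/new_neurons/intervention/intervention_funcs.py | delete_specified_keys_from_act_sum_dict
-- ===== SOURCE A (Python) =====
-- def delete_specified_keys_from_act_sum_dict(target_dict, delete_targets: list[tuple], THRESHOLD=0):
--     """
--     """
--     shared_neurons_non_translations = []  # list of tuples: [(layer_idx, neuron_idx)]
--     # 非対訳ペアに THRESHOLD回以上発火しているニューロンを収集
--     for layer_idx, neurons in delete_targets.items():
--         for neuron_idx, act_freqency in neurons.items():
--             if act_freqency > THRESHOLD:
--                 shared_neurons_non_translations.append((layer_idx, neuron_idx))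
--
--     # 削除対象のニューロンを記録
--     keys_to_remove = []
--     for layer_idx, neurons in target_dict.items():
--         for neuron_idx in neurons.keys():
--             if (layer_idx, neuron_idx) in shared_neurons_non_translations:
--                 keys_to_remove.append((layer_idx, neuron_idx))
--
--     # 一括削除処理
--     for layer_idx, neuron_idx in keys_to_remove:
--         del target_dict[layer_idx][neuron_idx]
--         # サブ辞書が空の場合、親キーを削除
--         if not target_dict[layer_idx]:
--             del target_dict[layer_idx]
--
--     return target_dict
-- ===== SOURCE B (Python) =====
-- def delete_specified_keys_from_act_sum_dict(target_dict, delete_targets: list[tuple], THRESHOLD=0):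
--     """Rebuild target_dict in one pass, looking frequencies up directly in the
--     nested delete_targets dict instead of flattening it into a tuple list.
--     NOTE: returns a fresh dict; unlike the original it does not mutate target_dict.
--     A layer is dropped only when the deletions emptied it (an originally empty
--     layer stays, as in the original)."""
--     result = {}
--     for layer_idx, neurons in target_dict.items():
--         freqs = delete_targets.get(layer_idx, {})
--         kept = {n: v for n, v in neurons.items() if freqs.get(n, THRESHOLD) <= THRESHOLD}
--         if kept or not neurons:
--             result[layer_idx] = kept
--     return result
-- ===== Notes on version B (the rewrite author's own statement) =====
-- stated objective: simpler
-- what changed: B drops A's flattened (layer,neuron) tuple list and the keys_to_remove pass with its linear membership scans, rebuilding the result in a single pass over target_dict with direct nested-dict lookups into delete_targets (return value only: A mutates target_dict in place, B returns a fresh dict).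
import Mathlib
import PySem

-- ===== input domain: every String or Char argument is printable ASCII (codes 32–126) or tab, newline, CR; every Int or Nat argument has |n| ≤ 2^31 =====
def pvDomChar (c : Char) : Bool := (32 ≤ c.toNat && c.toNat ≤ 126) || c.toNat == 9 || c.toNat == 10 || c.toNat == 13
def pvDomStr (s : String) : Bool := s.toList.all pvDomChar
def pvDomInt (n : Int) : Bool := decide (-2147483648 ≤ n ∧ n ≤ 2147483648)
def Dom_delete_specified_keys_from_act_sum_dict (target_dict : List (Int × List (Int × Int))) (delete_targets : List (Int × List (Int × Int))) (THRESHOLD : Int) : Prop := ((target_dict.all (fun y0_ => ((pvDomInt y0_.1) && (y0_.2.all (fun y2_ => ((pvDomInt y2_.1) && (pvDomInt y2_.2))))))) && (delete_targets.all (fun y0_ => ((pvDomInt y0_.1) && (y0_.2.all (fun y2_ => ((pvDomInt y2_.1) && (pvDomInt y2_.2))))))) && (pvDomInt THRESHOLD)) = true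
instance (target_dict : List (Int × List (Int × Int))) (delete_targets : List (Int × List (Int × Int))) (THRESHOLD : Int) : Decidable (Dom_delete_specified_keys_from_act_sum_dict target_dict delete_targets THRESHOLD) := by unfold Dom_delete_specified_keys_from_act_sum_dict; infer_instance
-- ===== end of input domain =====

-- B rebuilds the result in one pass with direct nested-dict lookups instead of A's flattened
-- tuple list + keys_to_remove passes; equivalence is about the RETURN value only (Python A
-- mutates target_dict in place, Python B returns a fresh dict).


-- ===== PORT A =====
-- first-match lookup in an association list (Python `d[k]` / `d.get(k)`)
def pvLookup (k : Int) : List (Int × List (Int × Int)) → Option (List (Int × Int))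
  | [] => none
  | (k', v) :: rest => if k' = k then some v else pvLookup k rest

-- inner lookup for the frequency sub-dicts
def pvLookupI (k : Int) : List (Int × Int) → Option Int
  | [] => none
  | (k', v) :: rest => if k' = k then some v else pvLookupI k rest

-- Python `del sub[n]`: remove the first pair with key n
def pvEraseKey (n : Int) : List (Int × Int) → List (Int × Int)
  | [] => []
  | (k, v) :: rest => if k = n then rest else (k, v) :: pvEraseKey n rest

-- mutate the value stored under the first entry with key l (Python mutates td[l] in place)
def pvModifyFirst (l : Int) (f : List (Int × Int) → List (Int × Int)) :
    List (Int × List (Int × Int)) → List (Int × List (Int × Int))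
  | [] => []
  | (k, v) :: rest => if k = l then (k, f v) :: rest else (k, v) :: pvModifyFirst l f rest

-- Python `del td[l]`: remove the first entry with key l
def pvEraseLayer (l : Int) : List (Int × List (Int × Int)) → List (Int × List (Int × Int))
  | [] => []
  | (k, v) :: rest => if k = l then rest else (k, v) :: pvEraseLayer l rest

-- one iteration of A's final deletion loop
def pvRemove1 (td : List (Int × List (Int × Int))) (key : Int × Int) :
    List (Int × List (Int × Int)) :=
  let td1 := pvModifyFirst key.1 (pvEraseKey key.2) td
  if pvLookup key.1 td1 = some [] then pvEraseLayer key.1 td1 else td1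

def delete_specified_keys_from_act_sum_dict (target_dict : List (Int × List (Int × Int))) (delete_targets : List (Int × List (Int × Int))) (THRESHOLD : Int) : List (Int × List (Int × Int)) :=
  -- collect neurons firing more than THRESHOLD in delete_targets
  let shared_neurons_non_translations : List (Int × Int) :=
    delete_targets.foldl (fun acc p =>
      p.2.foldl (fun acc2 q =>
        if q.2 > THRESHOLD then acc2 ++ [(p.1, q.1)] else acc2) acc) []
  -- record the neurons to delete
  let keys_to_remove : List (Int × Int) :=
    target_dict.foldl (fun acc p =>
      p.2.foldl (fun acc2 q =>
        if (p.1, q.1) ∈ shared_neurons_non_translations then acc2 ++ [(p.1, q.1)] else acc2) acc) []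
  -- bulk deletion
  keys_to_remove.foldl pvRemove1 target_dict

-- ===== PORT B =====
def delete_specified_keys_from_act_sum_dict_alt (target_dict : List (Int × List (Int × Int))) (delete_targets : List (Int × List (Int × Int))) (THRESHOLD : Int) : List (Int × List (Int × Int)) :=
  target_dict.foldl (fun (result : List (Int × List (Int × Int))) p =>
    let freqs : List (Int × Int) := (pvLookup p.1 delete_targets).getD []
    let kept : List (Int × Int) := p.2.filter (fun q => (pvLookupI q.1 freqs).getD THRESHOLD ≤ THRESHOLD)
    if kept ≠ [] ∨ p.2 = [] then result ++ [(p.1, kept)] else result) []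

-- ===== PRECONDITION & SPEC =====
-- Pre_ requires all keys of each association-list dict (outer layers and inner neurons) to be
-- distinct: the lists encode Python dicts, which cannot hold duplicate keys, so no Python
-- input is excluded.
def Pre_delete_specified_keys_from_act_sum_dict (target_dict : List (Int × List (Int × Int))) (delete_targets : List (Int × List (Int × Int))) (THRESHOLD : Int) : Prop :=
  (target_dict.map Prod.fst).Nodup ∧ (∀ p ∈ target_dict, (p.2.map Prod.fst).Nodup) ∧
  (delete_targets.map Prod.fst).Nodup ∧ (∀ p ∈ delete_targets, (p.2.map Prod.fst).Nodup)
instance (target_dict : List (Int × List (Int × Int))) (delete_targets : List (Int × List (Int × Int))) (THRESHOLD : Int) : Decidable (Pre_delete_specified_keys_from_act_sum_dict target_dict delete_targets THRESHOLD) := by unfold Pre_delete_specified_keys_from_act_sum_dict; infer_instance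

def pvWitness_delete_specified_keys_from_act_sum_dict : (List (Int × List (Int × Int))) × (List (Int × List (Int × Int))) × Int :=
  ([(0, [(1, 5), (2, 0)]), (3, [(4, 7)])], [(0, [(1, 3)]), (3, [(4, 0)])], 1)

def Spec_delete_specified_keys_from_act_sum_dict (target_dict : List (Int × List (Int × Int))) (delete_targets : List (Int × List (Int × Int))) (THRESHOLD : Int) (out : List (Int × List (Int × Int))) : Prop := out = delete_specified_keys_from_act_sum_dict_alt target_dict delete_targets THRESHOLD
instance (target_dict : List (Int × List (Int × Int))) (delete_targets : List (Int × List (Int × Int))) (THRESHOLD : Int) (out : List (Int × List (Int × Int))) : Decidable (Spec_delete_specified_keys_from_act_sum_dict target_dict delete_targets THRESHOLD out) := by unfold Spec_delete_specified_keys_from_act_sum_dict; infer_instance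

-- ===== CLAIM (what is proved, stated in full; the proofs are below) =====
def Claim_equal_delete_specified_keys_from_act_sum_dict : Prop := ∀ (target_dict : List (Int × List (Int × Int))) (delete_targets : List (Int × List (Int × Int))) (THRESHOLD : Int), Dom_delete_specified_keys_from_act_sum_dict target_dict delete_targets THRESHOLD → Pre_delete_specified_keys_from_act_sum_dict target_dict delete_targets THRESHOLD → Spec_delete_specified_keys_from_act_sum_dict target_dict delete_targets THRESHOLD (delete_specified_keys_from_act_sum_dict target_dict delete_targets THRESHOLD)

-- ===== LEMMAS AND PROOFS =====

-- proof-only helpers: B's deletion test and B's result in closed form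
def pvBad (dt : List (Int × List (Int × Int))) (TH l n : Int) : Bool :=
  decide (TH < (pvLookupI n ((pvLookup l dt).getD [])).getD TH)

def pvKept (dt : List (Int × List (Int × Int))) (TH : Int) (p : Int × List (Int × Int)) :
    List (Int × Int) :=
  p.2.filter (fun q => !pvBad dt TH p.1 q.1)

def pvBres (dt : List (Int × List (Int × Int))) (TH : Int) (td : List (Int × List (Int × Int))) :
    List (Int × List (Int × Int)) :=
  (td.filter (fun p => decide (pvKept dt TH p ≠ [] ∨ p.2 = []))).map
    (fun p => (p.1, pvKept dt TH p))

-- lookup lemmas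
theorem pvLookup_mem {l : Int} {v : List (Int × Int)} {dt : List (Int × List (Int × Int))}
    (h : pvLookup l dt = some v) : (l, v) ∈ dt := by
  induction dt with
  | nil => simp [pvLookup] at h
  | cons p rest ih =>
    obtain ⟨k, w⟩ := p
    by_cases hk : k = l
    · subst hk; simp [pvLookup] at h; simp [h]
    · simp [pvLookup, hk] at h
      exact List.mem_cons_of_mem _ (ih h)

theorem pvLookup_of_mem {l : Int} {v : List (Int × Int)} {dt : List (Int × List (Int × Int))}
    (hnd : (dt.map Prod.fst).Nodup) (h : (l, v) ∈ dt) : pvLookup l dt = some v := by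
  induction dt with
  | nil => simp at h
  | cons p rest ih =>
    obtain ⟨k, w⟩ := p
    simp only [List.map_cons, List.nodup_cons] at hnd
    rcases List.mem_cons.mp h with h1 | h1
    · cases h1; simp [pvLookup]
    · have hkl : k ≠ l := by
        intro hkl; subst hkl
        exact hnd.1 (List.mem_map.mpr ⟨(k, v), h1, rfl⟩)
      simp [pvLookup, hkl]
      exact ih hnd.2 h1

theorem pvLookupI_mem {n f : Int} {ns : List (Int × Int)}
    (h : pvLookupI n ns = some f) : (n, f) ∈ ns := by
  induction ns with
  | nil => simp [pvLookupI] at h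
  | cons p rest ih =>
    obtain ⟨k, w⟩ := p
    by_cases hk : k = n
    · subst hk; simp [pvLookupI] at h; simp [h]
    · simp [pvLookupI, hk] at h
      exact List.mem_cons_of_mem _ (ih h)

theorem pvLookupI_of_mem {n f : Int} {ns : List (Int × Int)}
    (hnd : (ns.map Prod.fst).Nodup) (h : (n, f) ∈ ns) : pvLookupI n ns = some f := by
  induction ns with
  | nil => simp at h
  | cons p rest ih =>
    obtain ⟨k, w⟩ := p
    simp only [List.map_cons, List.nodup_cons] at hnd
    rcases List.mem_cons.mp h with h1 | h1
    · cases h1; simp [pvLookupI]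
    · have hkl : k ≠ n := fun hkl =>
        hnd.1 (List.mem_map.mpr ⟨(n, f), h1, hkl.symm⟩)
      simp [pvLookupI, hkl]
      exact ih hnd.2 h1

-- both nested collecting loops of A have the same flatMap normal form
theorem pvCollect_eq (P : (Int × List (Int × Int)) → (Int × Int) → Prop)
    [inst : ∀ p q, Decidable (P p q)] :
    ∀ (l : List (Int × List (Int × Int))) (acc : List (Int × Int)),
      l.foldl (fun acc p => p.2.foldl
          (fun a2 q => if P p q then a2 ++ [(p.1, q.1)] else a2) acc) acc
        = acc ++ l.flatMap (fun p =>
            (p.2.filter (fun q => decide (P p q))).map (fun q => (p.1, q.1))) := by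
  intro l
  induction l with
  | nil => intro acc; simp
  | cons p rest ih =>
    intro acc
    have hinner : ∀ (a : List (Int × Int)),
        p.2.foldl (fun a2 q => if P p q then a2 ++ [(p.1, q.1)] else a2) a
          = a ++ (p.2.filter (fun q => decide (P p q))).map (fun q => (p.1, q.1)) := by
      intro a
      induction p.2 generalizing a with
      | nil => simp
      | cons q qs ihq =>
        by_cases hq : P p q
        · simp [hq, ihq]
        · simp [hq, ihq]
    simp only [List.foldl_cons, hinner, List.flatMap_cons, ih, List.append_assoc]

-- membership in the flattened shared list ↔ B's direct nested lookup succeeds, under Nodup keys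
theorem pvShared_char (dt : List (Int × List (Int × Int))) (TH : Int)
    (hnd : (dt.map Prod.fst).Nodup) (hnds : ∀ p ∈ dt, (p.2.map Prod.fst).Nodup) (l n : Int) :
    decide ((l, n) ∈ dt.flatMap (fun p =>
        (p.2.filter (fun q => decide (q.2 > TH))).map (fun q => (p.1, q.1))))
      = pvBad dt TH l n := by
  have hiff : ((l, n) ∈ dt.flatMap (fun p =>
      (p.2.filter (fun q => decide (q.2 > TH))).map (fun q => (p.1, q.1))))
      ↔ pvBad dt TH l n = true := by
    constructor
    · intro hmem
      simp only [List.mem_flatMap, List.mem_map, List.mem_filter] at hmem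
      obtain ⟨p, hp, q, ⟨hq, hgt⟩, heq⟩ := hmem
      obtain ⟨h1, h2⟩ := Prod.mk.injEq .. ▸ heq
      have hl : pvLookup l dt = some p.2 := by
        have : (l, p.2) ∈ dt := by rw [← h1]; exact hp
        exact pvLookup_of_mem hnd this
      have hn : pvLookupI n p.2 = some q.2 := by
        have : (n, q.2) ∈ p.2 := by rw [← h2]; exact hq
        exact pvLookupI_of_mem (hnds p hp) this
      simp only [pvBad, hl, Option.getD_some, hn, decide_eq_true_eq]
      exact of_decide_eq_true hgt
    · intro hbad
      simp only [pvBad, decide_eq_true_eq] at hbad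
      cases hdl : pvLookup l dt with
      | none => rw [hdl] at hbad; simp [pvLookupI] at hbad
      | some ns =>
        rw [hdl] at hbad
        simp only [Option.getD_some] at hbad
        cases hni : pvLookupI n ns with
        | none => rw [hni] at hbad; simp at hbad
        | some f =>
          rw [hni] at hbad
          simp only [Option.getD_some] at hbad
          simp only [List.mem_flatMap, List.mem_map, List.mem_filter]
          exact ⟨(l, ns), pvLookup_mem hdl, (n, f), ⟨pvLookupI_mem hni, decide_eq_true hbad⟩, rfl⟩
  rcases Bool.eq_false_or_eq_true (pvBad dt TH l n) with hb | hb
  · rw [hb]; exact decide_eq_true (hiff.mpr hb)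
  · rw [hb]; exact decide_eq_false (fun h => by rw [hiff.mp h] at hb; exact Bool.true_eq_false.mp hb)

-- erase on Nodup keys is a filter
theorem pvEraseKey_eq_filter (n : Int) (ns : List (Int × Int))
    (hnd : (ns.map Prod.fst).Nodup) :
    pvEraseKey n ns = ns.filter (fun q => !decide (q.1 = n)) := by
  induction ns with
  | nil => rfl
  | cons q qs ih =>
    simp only [List.map_cons, List.nodup_cons] at hnd
    by_cases hq : q.1 = n
    · have this : List.filter (fun q => !decide (q.1 = n)) qs = qs := by
        apply List.filter_eq_self.mpr
        intro a ha
        simp only [Bool.not_eq_eq_eq_not, Bool.not_true, decide_eq_false_iff_not]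
        intro hin
        rw [← hq] at hin
        exact hnd.1 (List.mem_map.mpr ⟨a, ha, hin⟩)
      cases q with
      | mk k v =>
        simp only at hq; subst hq
        simp [pvEraseKey, this]
    · cases q with
      | mk k v =>
        simp only at hq
        simp [pvEraseKey, hq, ih hnd.2]

-- processing one layer's removal group
theorem pvGrp (l : Int) (rest : List (Int × List (Int × Int))) :
    ∀ (rem : List Int) (cur : List (Int × Int)),
      rem.Nodup → (∀ n ∈ rem, n ∈ cur.map Prod.fst) → (cur.map Prod.fst).Nodup →
      (rem.map (fun n => (l, n))).foldl pvRemove1 ((l, cur) :: rest)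
        = if cur.filter (fun q => !rem.contains q.1) = [] ∧ rem ≠ [] then rest
          else (l, cur.filter (fun q => !rem.contains q.1)) :: rest := by
  intro rem
  induction rem with
  | nil =>
    intro cur _ _ _
    simp
  | cons n rem' ih =>
    intro cur hnodup hsub hcur
    simp only [List.nodup_cons] at hnodup
    have hek : pvEraseKey n cur = cur.filter (fun q => !decide (q.1 = n)) :=
      pvEraseKey_eq_filter n cur hcur
    have hstep : pvRemove1 ((l, cur) :: rest) (l, n)
        = if (cur.filter (fun q => !decide (q.1 = n))) = [] then rest
          else (l, cur.filter (fun q => !decide (q.1 = n))) :: rest := by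
      simp only [pvRemove1, pvModifyFirst, hek]
      by_cases hemp : cur.filter (fun q => !decide (q.1 = n)) = []
      · simp [hemp, pvLookup, pvEraseLayer]
      · simp [hemp, pvLookup]
    have hcomb : ∀ (c : List (Int × Int)),
        (c.filter (fun q => !decide (q.1 = n))).filter (fun q => !rem'.contains q.1)
          = c.filter (fun q => !(n :: rem').contains q.1) := by
      intro c
      rw [List.filter_filter]
      apply List.filter_congr
      intro q _
      simp only [List.contains_cons, Bool.not_or]
      rw [Bool.and_comm]
      rfl
    by_cases hemp : cur.filter (fun q => !decide (q.1 = n)) = []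
    · -- the sub-dict became empty: no removal keys can remain
      have hall : ∀ q ∈ cur, q.1 = n := by
        intro q hq
        have := List.filter_eq_nil_iff.mp hemp q hq
        simpa using this
      have hrem' : rem' = [] := by
        apply List.eq_nil_iff_forall_not_mem.mpr
        intro n' hn'
        obtain ⟨q, hq, hq1⟩ := List.mem_map.mp (hsub n' (List.mem_cons_of_mem _ hn'))
        have hnn : n' = n := by rw [← hq1]; exact hall q hq
        exact hnodup.1 (hnn ▸ hn')
      subst hrem'
      have hcomb0 : cur.filter (fun q => !(n :: ([] : List Int)).contains q.1) = [] := by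
        rw [← hcomb]
        simp [hemp]
      simp only [List.map_cons, List.foldl_cons, hstep, if_pos hemp, List.map_nil,
        List.foldl_nil, hcomb0]
      simp
    · -- the sub-dict is still non-empty; recurse on the remaining keys
      have hc1 : cur.filter (fun q => !decide (q.1 = n)) ≠ [] := hemp
      have hsub' : ∀ n' ∈ rem', n' ∈ (cur.filter (fun q => !decide (q.1 = n))).map Prod.fst := by
        intro n' hn'
        have hne : n' ≠ n := fun h => hnodup.1 (h ▸ hn')
        obtain ⟨q, hq, hq1⟩ := List.mem_map.mp (hsub n' (List.mem_cons_of_mem _ hn'))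
        exact List.mem_map.mpr ⟨q, List.mem_filter.mpr ⟨hq, by simp [hq1, hne]⟩, hq1⟩
      have hsl : (cur.filter (fun q => !decide (q.1 = n))).Sublist cur := List.filter_sublist
      have hnd' : ((cur.filter (fun q => !decide (q.1 = n))).map Prod.fst).Nodup :=
        (hsl.map Prod.fst).nodup hcur
      have hrec := ih (cur.filter (fun q => !decide (q.1 = n))) hnodup.2 hsub' hnd'
      simp only [List.map_cons, List.foldl_cons, hstep, if_neg hemp, hrec, hcomb]
      have hfilter_nil : ∀ (L : List (Int × Int)),
          L.filter (fun q => !([] : List Int).contains q.1) = L := by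
        intro L
        induction L with
        | nil => rfl
        | cons a t _ => simp
      by_cases hce : cur.filter (fun q => !(n :: rem').contains q.1) = []
      · have hrem'ne : rem' ≠ [] := by
          intro h; subst h
          exact hc1 ((hfilter_nil _).symm.trans ((hcomb cur).trans hce))
        rw [if_pos ⟨hce, hrem'ne⟩, if_pos ⟨hce, List.cons_ne_nil n rem'⟩]
      · rw [if_neg (fun h => hce h.1), if_neg (fun h => hce h.1)]

-- a removal key for a different layer skips the head entry
theorem pvRemove1_cons {k : Int × Int} {l : Int} (h : k.1 ≠ l)
    (x : List (Int × Int)) (rest : List (Int × List (Int × Int))) :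
    pvRemove1 ((l, x) :: rest) k = (l, x) :: pvRemove1 rest k := by
  have hne : l ≠ k.1 := fun hh => h hh.symm
  simp only [pvRemove1, pvModifyFirst, pvLookup, pvEraseLayer, if_neg hne]
  split <;> rfl

theorem pvFoldl_skip (l : Int) (x : List (Int × Int)) :
    ∀ (keys : List (Int × Int)) (rest : List (Int × List (Int × Int))),
      (∀ k ∈ keys, k.1 ≠ l) →
      keys.foldl pvRemove1 ((l, x) :: rest) = (l, x) :: keys.foldl pvRemove1 rest := by
  intro keys
  induction keys with
  | nil => intro rest h; rfl
  | cons k ks ih =>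
    intro rest h
    simp only [List.foldl_cons]
    rw [pvRemove1_cons (h k (List.mem_cons_self)) x rest]
    exact ih _ (fun k' hk' => h k' (List.mem_cons_of_mem _ hk'))

-- the main lemma: A's deletion fold over the collected keys equals B's rebuilt result
theorem pvMain (dt : List (Int × List (Int × Int))) (TH : Int) :
    ∀ (td : List (Int × List (Int × Int))),
      (td.map Prod.fst).Nodup → (∀ p ∈ td, (p.2.map Prod.fst).Nodup) →
      (td.flatMap (fun p =>
          (p.2.filter (fun q => pvBad dt TH p.1 q.1)).map (fun q => (p.1, q.1)))).foldl
        pvRemove1 td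
      = pvBres dt TH td := by
  intro td
  induction td with
  | nil =>
    intro _ _
    simp [pvBres]
  | cons p rest ih =>
    intro hnd hnds
    obtain ⟨l, ns⟩ := p
    simp only [List.map_cons, List.nodup_cons] at hnd
    have hns : (ns.map Prod.fst).Nodup := hnds (l, ns) List.mem_cons_self
    -- the removal keys of the head layer, as plain neuron indices
    have hrem : ((ns.filter (fun q => pvBad dt TH l q.1)).map (fun q => ((l : Int), q.1)))
        = ((ns.filter (fun q => pvBad dt TH l q.1)).map Prod.fst).map (fun n => (l, n)) := by
      rw [List.map_map]
      rfl
    have hremnd : (((ns.filter (fun q => pvBad dt TH l q.1)).map Prod.fst)).Nodup :=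
      ((List.filter_sublist (l := ns)).map Prod.fst).nodup hns
    have hremsub : ∀ n' ∈ (ns.filter (fun q => pvBad dt TH l q.1)).map Prod.fst,
        n' ∈ ns.map Prod.fst := by
      intro n' hn'
      obtain ⟨q, hq, hq1⟩ := List.mem_map.mp hn'
      exact List.mem_map.mpr ⟨q, (List.mem_filter.mp hq).1, hq1⟩
    have hgrp := pvGrp l rest ((ns.filter (fun q => pvBad dt TH l q.1)).map Prod.fst)
      ns hremnd hremsub hns
    -- for members of ns, membership in the removal keys is exactly pvBad
    have hkey : ∀ q ∈ ns,
        ((ns.filter (fun q => pvBad dt TH l q.1)).map Prod.fst).contains q.1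
          = pvBad dt TH l q.1 := by
      intro q hq
      by_cases hb : pvBad dt TH l q.1 = true
      · rw [hb]
        exact List.contains_iff_mem.mpr (List.mem_map.mpr ⟨q, List.mem_filter.mpr ⟨hq, hb⟩, rfl⟩)
      · rw [Bool.eq_false_iff.mpr hb]
        rw [Bool.eq_false_iff]
        intro hc
        obtain ⟨q', hq', hq'1⟩ := List.mem_map.mp (List.contains_iff_mem.mp hc)
        obtain ⟨hq'mem, hq'bad⟩ := List.mem_filter.mp hq'
        have : q' = q := List.inj_on_of_nodup_map hns hq'mem hq hq'1
        exact hb (this ▸ hq'bad)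
    have hkept : ns.filter (fun q =>
        !((ns.filter (fun q => pvBad dt TH l q.1)).map Prod.fst).contains q.1)
        = pvKept dt TH (l, ns) := by
      apply List.filter_congr
      intro q hq
      rw [hkey q hq]
    -- skip condition for the remaining layers' keys
    have hskip : ∀ k ∈ rest.flatMap (fun p =>
        (p.2.filter (fun q => pvBad dt TH p.1 q.1)).map (fun q => (p.1, q.1))), k.1 ≠ l := by
      intro k hk
      obtain ⟨p', hp', hk2⟩ := List.mem_flatMap.mp hk
      obtain ⟨q, _, hq1⟩ := List.mem_map.mp hk2
      have : k.1 = p'.1 := by rw [← hq1]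
      rw [this]
      intro hh
      exact hnd.1 (List.mem_map.mpr ⟨p', hp', hh⟩)
    have hBres : pvBres dt TH ((l, ns) :: rest)
        = if pvKept dt TH (l, ns) ≠ [] ∨ ns = []
          then (l, pvKept dt TH (l, ns)) :: pvBres dt TH rest
          else pvBres dt TH rest := by
      by_cases hc : pvKept dt TH (l, ns) ≠ [] ∨ ns = []
      · simp only [pvBres, List.filter_cons, decide_eq_true hc, if_pos hc]
        simp
      · simp only [pvBres, List.filter_cons, decide_eq_false hc, if_neg hc]
        rfl
    have hih := ih hnd.2 (fun p hp => hnds p (List.mem_cons_of_mem _ hp))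
    simp only [List.flatMap_cons, List.foldl_append, hrem, hgrp, hkept]
    by_cases hdrop : pvKept dt TH (l, ns) = [] ∧
        ((ns.filter (fun q => pvBad dt TH l q.1)).map Prod.fst) ≠ []
    · rw [if_pos hdrop, hih, hBres]
      have hnsne : ns ≠ [] := by
        intro h; subst h
        exact hdrop.2 rfl
      rw [if_neg (by
        intro h
        rcases h with h | h
        · exact h hdrop.1
        · exact hnsne h)]
    · rw [if_neg hdrop, pvFoldl_skip l (pvKept dt TH (l, ns)) _ rest hskip, hih, hBres]
      have hc : pvKept dt TH (l, ns) ≠ [] ∨ ns = [] := by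
        by_cases hk : pvKept dt TH (l, ns) = []
        · right
          by_cases hrem0 : ((ns.filter (fun q => pvBad dt TH l q.1)).map Prod.fst) = []
          · -- no removal keys at all: kept = ns, so ns = []
            have hallbad : ∀ q ∈ ns, pvBad dt TH l q.1 = false := by
              intro q hq
              by_cases hb : pvBad dt TH l q.1 = true
              · exfalso
                have : (q.1) ∈ ((ns.filter (fun q => pvBad dt TH l q.1)).map Prod.fst) :=
                  List.mem_map.mpr ⟨q, List.mem_filter.mpr ⟨hq, hb⟩, rfl⟩
                rw [hrem0] at this
                simp at this
              · exact Bool.eq_false_iff.mpr hb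
            have : pvKept dt TH (l, ns) = ns := by
              apply List.filter_eq_self.mpr
              intro q hq
              rw [hallbad q hq]
              rfl
            rw [← this, hk]
          · exact absurd ⟨hk, hrem0⟩ hdrop
        · left; exact hk
      rw [if_pos hc]

theorem pvBres_cons (dt : List (Int × List (Int × Int))) (TH : Int)
    (p : Int × List (Int × Int)) (rest : List (Int × List (Int × Int))) :
    pvBres dt TH (p :: rest)
      = if pvKept dt TH p ≠ [] ∨ p.2 = []
        then (p.1, pvKept dt TH p) :: pvBres dt TH rest
        else pvBres dt TH rest := by
  by_cases hc : pvKept dt TH p ≠ [] ∨ p.2 = []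
  · simp only [pvBres, List.filter_cons, decide_eq_true hc, if_pos hc]
    simp
  · simp only [pvBres, List.filter_cons, decide_eq_false hc, if_neg hc]
    rfl

-- B's foldl equals the closed form
theorem pvAlt_eq (dt : List (Int × List (Int × Int))) (TH : Int)
    (td : List (Int × List (Int × Int))) :
    delete_specified_keys_from_act_sum_dict_alt td dt TH = pvBres dt TH td := by
  have hk : ∀ (p : Int × List (Int × Int)),
      p.2.filter (fun q => decide ((pvLookupI q.1 ((pvLookup p.1 dt).getD [])).getD TH ≤ TH))
        = pvKept dt TH p := by
    intro p
    apply List.filter_congr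
    intro q _
    have : decide ((pvLookupI q.1 ((pvLookup p.1 dt).getD [])).getD TH ≤ TH)
        = decide (¬ TH < (pvLookupI q.1 ((pvLookup p.1 dt).getD [])).getD TH) :=
      decide_eq_decide.mpr (Int.not_lt).symm
    rw [this, decide_not]
    rfl
  have hgen : ∀ (l : List (Int × List (Int × Int))) (acc : List (Int × List (Int × Int))),
      l.foldl (fun (result : List (Int × List (Int × Int))) p =>
        if pvKept dt TH p ≠ [] ∨ p.2 = [] then result ++ [(p.1, pvKept dt TH p)] else result) acc
      = acc ++ pvBres dt TH l := by
    intro l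
    induction l with
    | nil => intro acc; simp [pvBres]
    | cons p rest ih =>
      intro acc
      simp only [List.foldl_cons, pvBres_cons]
      by_cases hc : pvKept dt TH p ≠ [] ∨ p.2 = []
      · rw [if_pos hc, if_pos hc, ih, List.append_assoc, List.singleton_append]
      · rw [if_neg hc, if_neg hc, ih]
  have hbody : (fun (result : List (Int × List (Int × Int))) (p : Int × List (Int × Int)) =>
        let freqs : List (Int × Int) := (pvLookup p.1 dt).getD []
        let kept : List (Int × Int) := p.2.filter (fun q => (pvLookupI q.1 freqs).getD TH ≤ TH)
        if kept ≠ [] ∨ p.2 = [] then result ++ [(p.1, kept)] else result)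
      = (fun (result : List (Int × List (Int × Int))) p =>
        if pvKept dt TH p ≠ [] ∨ p.2 = [] then result ++ [(p.1, pvKept dt TH p)] else result) := by
    funext result p
    simp only [hk]
  show td.foldl (fun (result : List (Int × List (Int × Int))) p =>
        let freqs : List (Int × Int) := (pvLookup p.1 dt).getD []
        let kept : List (Int × Int) := p.2.filter (fun q => (pvLookupI q.1 freqs).getD TH ≤ TH)
        if kept ≠ [] ∨ p.2 = [] then result ++ [(p.1, kept)] else result) []
      = pvBres dt TH td
  rw [hbody]
  exact (hgen td []).trans (List.nil_append _)


theorem delete_specified_keys_from_act_sum_dict_witness :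
    Dom_delete_specified_keys_from_act_sum_dict pvWitness_delete_specified_keys_from_act_sum_dict.1 pvWitness_delete_specified_keys_from_act_sum_dict.2.1 pvWitness_delete_specified_keys_from_act_sum_dict.2.2 ∧
    Pre_delete_specified_keys_from_act_sum_dict pvWitness_delete_specified_keys_from_act_sum_dict.1 pvWitness_delete_specified_keys_from_act_sum_dict.2.1 pvWitness_delete_specified_keys_from_act_sum_dict.2.2 := by
  decide

-- ===== VERDICT (by name: the statement is the Claim_ definition above) =====
theorem delete_specified_keys_from_act_sum_dict_spec : Claim_equal_delete_specified_keys_from_act_sum_dict := by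
  intro td dt TH _ hpre
  obtain ⟨h1, h2, h3, h4⟩ := hpre
  show delete_specified_keys_from_act_sum_dict td dt TH
      = delete_specified_keys_from_act_sum_dict_alt td dt TH
  rw [pvAlt_eq dt TH td, ← pvMain dt TH td h1 h2]
  show (td.foldl (fun acc p => p.2.foldl
      (fun a2 q => if (p.1, q.1) ∈ (dt.foldl (fun acc p => p.2.foldl
          (fun a2 q => if q.2 > TH then a2 ++ [(p.1, q.1)] else a2) acc) [])
        then a2 ++ [(p.1, q.1)] else a2) acc) []).foldl pvRemove1 td
    = _
  rw [pvCollect_eq (fun _ q => q.2 > TH) dt []]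
  rw [pvCollect_eq (fun p q => (p.1, q.1) ∈ ([] ++ dt.flatMap (fun p =>
      (p.2.filter (fun q => decide (q.2 > TH))).map (fun q => (p.1, q.1))))) td []]
  simp only [List.nil_append]
  have hfun : (fun (p : Int × List (Int × Int)) =>
        (p.2.filter (fun q => decide ((p.1, q.1) ∈ dt.flatMap (fun p =>
          (p.2.filter (fun q => decide (q.2 > TH))).map (fun q => (p.1, q.1)))))).map
          (fun q => (p.1, q.1)))
      = (fun (p : Int × List (Int × Int)) =>
        (p.2.filter (fun q => pvBad dt TH p.1 q.1)).map (fun q => (p.1, q.1))) := by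
    funext p
    have hpred : (fun (q : Int × Int) => decide ((p.1, q.1) ∈ dt.flatMap (fun p =>
        (p.2.filter (fun q => decide (q.2 > TH))).map (fun q => (p.1, q.1)))))
        = (fun q => pvBad dt TH p.1 q.1) :=
      funext fun q => pvShared_char dt TH h3 h4 p.1 q.1
    rw [hpred]
  exact congrArg (fun f => (td.flatMap f).foldl pvRemove1 td) hfun
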